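-- pv_equiv track=rewrite | github.com/HwangSeonPark/UniKG | evaluate/construction/common/graph/common.py | _bfs
-- ===== SOURCE A (Python) =====
-- from typing import List, Dict, Set, Optional
-- from collections import defaultdict, deque
--
-- def _bfs(g: Dict[str, List[str]], s: str, t: str) -> bool:
--     if s == t:
--         return True
--     v = {s}
--     q = deque([s])
--     while q:
--         c = q.popleft()
--         if c == t:
--             return True
--         if c in g:
--             for n in g[c]:
--                 if n not in v:
--                     v.add(n)
--                     q.append(n)
--     return False
-- ===== SOURCE B (Python) =====
-- def _bfs(g, s, t):
--     reach = {s}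
--     changed = True
--     while changed:
--         changed = False
--         for c, ns in g.items():
--             if c in reach:
--                 for n in ns:
--                     if n not in reach:
--                         reach.add(n)
--                         changed = True
--     return t in reach
-- ===== Notes on version B (the rewrite author's own statement) =====
-- stated objective: alternative
-- what changed: Replaces the deque-based BFS with a chaotic fixpoint iteration: repeatedly sweep all adjacency entries, adding targets of already-reached sources until a full sweep changes nothing, then test membership of t.
import Mathlib
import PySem

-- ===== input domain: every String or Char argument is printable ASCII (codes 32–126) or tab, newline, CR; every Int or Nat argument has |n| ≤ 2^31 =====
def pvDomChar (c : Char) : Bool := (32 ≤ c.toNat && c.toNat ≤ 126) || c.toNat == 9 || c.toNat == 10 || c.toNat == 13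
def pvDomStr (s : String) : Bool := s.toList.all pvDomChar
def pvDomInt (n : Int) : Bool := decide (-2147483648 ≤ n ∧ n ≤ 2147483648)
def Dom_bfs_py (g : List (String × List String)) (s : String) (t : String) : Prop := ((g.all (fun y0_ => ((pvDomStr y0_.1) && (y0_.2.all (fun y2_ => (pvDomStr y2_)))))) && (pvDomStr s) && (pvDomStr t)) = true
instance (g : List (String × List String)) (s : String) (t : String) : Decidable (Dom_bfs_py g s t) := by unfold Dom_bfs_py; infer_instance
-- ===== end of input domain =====

-- B replaces A's deque-based BFS by a chaotic fixpoint iteration (sweep all adjacency entries until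
-- nothing changes, then test membership); equivalence goes through "t is reachable from s".

-- generic filter-counting lemmas used by the termination measures of both loops
theorem pvFilterLenLe {α : Type} (l : List α) (p q : α → Bool)
    (himp : ∀ x, q x = true → p x = true) : (l.filter q).length ≤ (l.filter p).length := by
  induction l with
  | nil => simp
  | cons a l ih =>
    by_cases hq : q a = true
    · simp [List.filter, hq, himp a hq]; omega
    · simp only [Bool.not_eq_true] at hq
      rw [List.filter, hq]
      by_cases hp : p a = true
      · simp [List.filter, hp]; omega
      · simp only [Bool.not_eq_true] at hp; rw [List.filter, hp]; exact ih

theorem pvFilterLenLt {α : Type} (l : List α) (p q : α → Bool)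
    (himp : ∀ x, q x = true → p x = true)
    (x : α) (hx : x ∈ l) (hp : p x = true) (hq : q x = false) :
    (l.filter q).length < (l.filter p).length := by
  induction l with
  | nil => cases hx
  | cons a l ih =>
    rcases List.mem_cons.mp hx with rfl | hx'
    · have hle := pvFilterLenLe l p q himp
      simp [List.filter, hp, hq]; omega
    · by_cases hqa : q a = true
      · simp [List.filter, hqa, himp a hqa]; exact ih hx'
      · simp only [Bool.not_eq_true] at hqa
        rw [List.filter, hqa]
        by_cases hpa : p a = true
        · have := ih hx'; simp [List.filter, hpa]; omega
        · simp only [Bool.not_eq_true] at hpa; rw [List.filter, hpa]; exact ih hx'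

-- a successful assoc-list lookup is a member (used by both termination arguments)
theorem pvLookupMem (l : List (String × List String)) (c : String) (ns : List String)
    (h : l.lookup c = some ns) : (c, ns) ∈ l := by
  induction l with
  | nil => simp [List.lookup] at h
  | cons p l ih =>
    obtain ⟨k, v⟩ := p
    rw [List.lookup] at h
    by_cases hc : c = k
    · subst hc; simp at h; subst h; exact List.mem_cons_self
    · rw [show (c == k) = false from beq_eq_false_iff_ne.mpr hc] at h
      exact List.mem_cons.mpr (Or.inr (ih h))

-- ===== PORT A =====
-- A: BFS.  bfsEnq is one step of 'for n in g[c]: if n not in v: v.add(n); q.append(n)'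
def bfsEnq (st : PySem.Set String × List String) (n : String) : PySem.Set String × List String :=
  if n ∈ st.1 then st else (PySem.Set.add st.1 n, st.2 ++ [n])

-- measure lemma for the while-loop's termination (cited by decreasing_by)
theorem bfsEnq_measure (U : List String) (ns : List String) (hU : ∀ n ∈ ns, n ∈ U) :
    ∀ v q, ((U.filter (fun x => decide (x ∉ (ns.foldl bfsEnq (v, q)).1))).length
              + (ns.foldl bfsEnq (v, q)).2.length)
      ≤ (U.filter (fun x => decide (x ∉ v))).length + q.length := by
  revert hU
  induction ns with
  | nil => intro _ v q; simp
  | cons n ns ih =>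
    intro hU v q
    have hU' : ∀ m ∈ ns, m ∈ U := fun m hm => hU m (List.mem_cons_of_mem _ hm)
    rw [List.foldl_cons]
    by_cases hm : n ∈ v
    · have he : bfsEnq (v, q) n = (v, q) := by simp [bfsEnq, hm]
      rw [he]; exact ih hU' v q
    · have he : bfsEnq (v, q) n = (v ++ [n], q ++ [n]) := by
        simp [bfsEnq, hm, PySem.Set.add, PySem.Set.contains]
      rw [he]
      have hlt : (U.filter (fun x => decide (x ∉ v ++ [n]))).length
          < (U.filter (fun x => decide (x ∉ v))).length := by
        refine pvFilterLenLt U _ _ ?_ n (hU n List.mem_cons_self) (by simpa using hm) (by simp)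
        intro x hx
        simp only [decide_eq_true_eq, List.mem_append] at *
        tauto
      have := ih hU' (v ++ [n]) (q ++ [n])
      simp only [List.length_append, List.length_cons, List.length_nil] at *
      omega

def bfsLoop (g : List (String × List String)) (t : String)
    (v : PySem.Set String) (q : List String) : Bool :=
  match q with
  | [] => false
  | c :: rest =>
    if c = t then true
    else
      -- 'if c in g: for n in g[c]: …' ; a missing key iterates nothing
      let st := ((g.lookup c).getD []).foldl bfsEnq (v, rest)
      bfsLoop g t st.1 st.2
termination_by ((g.flatMap Prod.snd).filter (fun x => decide (x ∉ v))).length + q.length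
decreasing_by
  have hU : ∀ n ∈ (g.lookup c).getD [], n ∈ g.flatMap Prod.snd := by
    intro n hn
    cases hl : g.lookup c with
    | none => simp [hl] at hn
    | some ns =>
      rw [hl] at hn
      exact List.mem_flatMap.mpr ⟨(c, ns), pvLookupMem g c ns hl, hn⟩
  have := bfsEnq_measure (g.flatMap Prod.snd) ((g.lookup c).getD []) hU v rest
  simp only [List.length_cons]
  omega

def bfs_py (g : List (String × List String)) (s : String) (t : String) : Bool :=
  if s = t then true
  else bfsLoop g t (PySem.Set.ofList [s]) [s]

-- ===== PORT B =====
-- B: fixpoint sweeps (Source B).  passStep = 'if n not in reach: reach.add(n); changed = True'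
def passStep (st : PySem.Set String × Bool) (n : String) : PySem.Set String × Bool :=
  if n ∈ st.1 then st else (PySem.Set.add st.1 n, true)

-- one entry 'if c in reach: for n in ns: …'
def passPairs (st : PySem.Set String × Bool) (p : String × List String) :
    PySem.Set String × Bool :=
  if p.1 ∈ st.1 then p.2.foldl passStep st else st

-- one sweep 'changed = False; for c, ns in g.items(): …'
def pvPass (g : List (String × List String)) (reach : PySem.Set String) :
    PySem.Set String × Bool :=
  g.foldl passPairs (reach, false)

-- facts about the inner loop over one adjacency list
theorem passStepFold_props (ns : List String) :
    ∀ st : PySem.Set String × Bool,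
      (∀ x ∈ st.1, x ∈ (ns.foldl passStep st).1) ∧
      (∀ n ∈ ns, n ∈ (ns.foldl passStep st).1) ∧
      (∀ x ∈ (ns.foldl passStep st).1, x ∈ st.1 ∨ x ∈ ns) ∧
      ((ns.foldl passStep st).2 = true → st.2 = true ∨
        ∃ n, n ∈ (ns.foldl passStep st).1 ∧ n ∉ st.1 ∧ n ∈ ns) ∧
      ((ns.foldl passStep st).2 = false →
        st.2 = false ∧ (ns.foldl passStep st).1 = st.1 ∧ ∀ n ∈ ns, n ∈ st.1) := by
  induction ns with
  | nil => intro st; simp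
  | cons n ns ih =>
    intro st
    rw [List.foldl_cons]
    by_cases hm : n ∈ st.1
    · have he : passStep st n = st := by simp [passStep, hm]
      rw [he]
      obtain ⟨P1, P2, P3, P4, P5⟩ := ih st
      refine ⟨P1, ?_, ?_, ?_, ?_⟩
      · intro m hmm
        rcases List.mem_cons.mp hmm with rfl | h
        · exact P1 _ hm
        · exact P2 _ h
      · intro x hx
        rcases P3 x hx with h | h
        · exact Or.inl h
        · exact Or.inr (List.mem_cons_of_mem _ h)
      · intro h
        rcases P4 h with h | ⟨m, h1, h2, h3⟩
        · exact Or.inl h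
        · exact Or.inr ⟨m, h1, h2, List.mem_cons_of_mem _ h3⟩
      · intro h
        obtain ⟨a, b, c⟩ := P5 h
        refine ⟨a, b, fun m hmm => ?_⟩
        rcases List.mem_cons.mp hmm with rfl | h'
        · exact hm
        · exact c m h'
    · have he : passStep st n = (st.1 ++ [n], true) := by
        simp [passStep, hm, PySem.Set.add, PySem.Set.contains]
      rw [he]
      obtain ⟨P1, P2, P3, P4, P5⟩ := ih (st.1 ++ [n], true)
      refine ⟨?_, ?_, ?_, ?_, ?_⟩
      · intro x hx; exact P1 x (List.mem_append_left _ hx)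
      · intro m hmm
        rcases List.mem_cons.mp hmm with rfl | h
        · exact P1 m (List.mem_append_right _ List.mem_cons_self)
        · exact P2 _ h
      · intro x hx
        rcases P3 x hx with h | h
        · rcases List.mem_append.mp h with h' | h'
          · exact Or.inl h'
          · have : x = n := by simpa using h'
            subst this; exact Or.inr List.mem_cons_self
        · exact Or.inr (List.mem_cons_of_mem _ h)
      · intro _
        exact Or.inr ⟨n, P1 n (List.mem_append_right _ List.mem_cons_self), hm,
          List.mem_cons_self⟩
      · intro h
        obtain ⟨a, -, -⟩ := P5 h
        simp at a

-- facts about one whole sweep (cited by fixLoop's decreasing_by)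
theorem passFold_props (l : List (String × List String)) :
    ∀ st : PySem.Set String × Bool,
      (∀ x ∈ st.1, x ∈ (l.foldl passPairs st).1) ∧
      ((l.foldl passPairs st).2 = true → st.2 = true ∨
        ∃ n, n ∈ (l.foldl passPairs st).1 ∧ n ∉ st.1 ∧ n ∈ l.flatMap Prod.snd) ∧
      ((l.foldl passPairs st).2 = false →
        st.2 = false ∧ (l.foldl passPairs st).1 = st.1 ∧
          ∀ p ∈ l, p.1 ∈ st.1 → ∀ n ∈ p.2, n ∈ st.1) := by
  induction l with
  | nil => intro st; simp
  | cons p l ih =>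
    intro st
    rw [List.foldl_cons]
    by_cases hp : p.1 ∈ st.1
    · have he : passPairs st p = p.2.foldl passStep st := by simp [passPairs, hp]
      rw [he]
      obtain ⟨S1, S2, S3, S4, S5⟩ := passStepFold_props p.2 st
      obtain ⟨Q1, Q2, Q3⟩ := ih (p.2.foldl passStep st)
      refine ⟨fun x hx => Q1 x (S1 x hx), ?_, ?_⟩
      · intro h
        rcases Q2 h with h' | ⟨n, h1, h2, h3⟩
        · rcases S4 h' with h'' | ⟨n, h1, h2, h3⟩
          · exact Or.inl h''
          · exact Or.inr ⟨n, Q1 n h1, h2,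
              by rw [List.flatMap_cons]; exact List.mem_append_left _ h3⟩
        · refine Or.inr ⟨n, h1, fun hv => h2 (S1 n hv), ?_⟩
          rw [List.flatMap_cons]; exact List.mem_append_right _ h3
      · intro h
        obtain ⟨a1, a2, a3⟩ := Q3 h
        obtain ⟨b1, b2, b3⟩ := S5 a1
        refine ⟨b1, a2.trans b2, ?_⟩
        intro pp hpp hin n hn
        rcases List.mem_cons.mp hpp with rfl | h'
        · exact b3 n hn
        · have := a3 pp h' (by rw [b2]; exact hin) n hn
          rwa [b2] at this
    · have he : passPairs st p = st := by simp [passPairs, hp]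
      rw [he]
      obtain ⟨Q1, Q2, Q3⟩ := ih st
      refine ⟨Q1, ?_, ?_⟩
      · intro h
        rcases Q2 h with h' | ⟨n, h1, h2, h3⟩
        · exact Or.inl h'
        · refine Or.inr ⟨n, h1, h2, ?_⟩
          rw [List.flatMap_cons]; exact List.mem_append_right _ h3
      · intro h
        obtain ⟨a1, a2, a3⟩ := Q3 h
        refine ⟨a1, a2, ?_⟩
        intro pp hpp hin n hn
        rcases List.mem_cons.mp hpp with rfl | h'
        · exact absurd hin hp
        · exact a3 pp h' hin n hn

def fixLoop (g : List (String × List String)) (reach : PySem.Set String) : PySem.Set String :=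
  let st := pvPass g reach
  if st.2 then fixLoop g st.1 else st.1
termination_by ((g.flatMap Prod.snd).filter (fun x => decide (x ∉ reach))).length
decreasing_by
  obtain ⟨hmono, hch, -⟩ := passFold_props g (reach, false)
  rcases hch (by assumption) with hfalse | ⟨n, hn1, hn2, hn3⟩
  · exact absurd hfalse (by simp)
  · exact pvFilterLenLt (g.flatMap Prod.snd) _ _
      (by intro x hx; simp only [decide_eq_true_eq] at *; intro hv; exact hx (hmono x hv))
      n hn3 (by simpa using hn2) (by simpa using hn1)

def bfs_py_alt (g : List (String × List String)) (s : String) (t : String) : Bool :=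
  PySem.Set.contains (fixLoop g (PySem.Set.ofList [s])) t

-- ===== PRECONDITION & SPEC =====
-- Pre_ excludes association lists with duplicate keys: the argument stands for a Python dict, whose
-- keys are unique, so which entry "is" the dict on a duplicate-key list is a representation artefact
-- (A reads the first match, B sweeps every entry).
def Pre_bfs_py (g : List (String × List String)) (s : String) (t : String) : Prop :=
  (g.map Prod.fst).Nodup
instance (g : List (String × List String)) (s : String) (t : String) :
    Decidable (Pre_bfs_py g s t) := by unfold Pre_bfs_py; infer_instance

def pvWitness_bfs_py : (List (String × List String)) × String × String :=
  ([("a", ["b"]), ("b", ["c"])], "a", "c")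

def Spec_bfs_py (g : List (String × List String)) (s : String) (t : String) (out : Bool) : Prop := out = bfs_py_alt g s t
instance (g : List (String × List String)) (s : String) (t : String) (out : Bool) : Decidable (Spec_bfs_py g s t out) := by unfold Spec_bfs_py; infer_instance

-- ===== CLAIM (what is proved, stated in full; the proofs are below) =====
def Claim_equal_bfs_py : Prop := ∀ (g : List (String × List String)) (s : String) (t : String), Dom_bfs_py g s t → Pre_bfs_py g s t → Spec_bfs_py g s t (bfs_py g s t)

-- ===== LEMMAS AND PROOFS =====

-- the common specification: one adjacency step, and reachability
def pvEdge (g : List (String × List String)) (u n : String) : Prop :=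
  n ∈ (g.lookup u).getD []

def pvReach (g : List (String × List String)) (s x : String) : Prop :=
  Relation.ReflTransGen (pvEdge g) s x

theorem pvMemLookup (l : List (String × List String)) (c : String) (ns : List String)
    (hn : (l.map Prod.fst).Nodup) (h : (c, ns) ∈ l) : l.lookup c = some ns := by
  induction l with
  | nil => cases h
  | cons p l ih =>
    obtain ⟨k, v⟩ := p
    simp only [List.map_cons, List.nodup_cons] at hn
    rw [List.lookup]
    rcases List.mem_cons.mp h with he | h'
    · rw [Prod.mk.injEq] at he
      obtain ⟨rfl, rfl⟩ := he
      simp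
    · have hc : c ≠ k := by
        rintro rfl; exact hn.1 (List.mem_map.mpr ⟨(c, ns), h', rfl⟩)
      rw [show (c == k) = false from beq_eq_false_iff_ne.mpr hc]
      exact ih hn.2 h'

-- a set containing s and closed under edges contains everything reachable from s
theorem pvClosedComplete (g : List (String × List String)) (s : String) (R : List String)
    (hs : s ∈ R) (hcl : ∀ u ∈ R, ∀ n, pvEdge g u n → n ∈ R) :
    ∀ x, pvReach g s x → x ∈ R := by
  intro x hx
  induction hx with
  | refl => exact hs
  | tail _ he ih => exact hcl _ ih _ he

-- ---------- A: the BFS loop decides reachability ----------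

theorem bfsEnq_props (ns : List String) :
    ∀ v q,
      (∀ x ∈ v, x ∈ (ns.foldl bfsEnq (v, q)).1) ∧
      (∀ n ∈ ns, n ∈ (ns.foldl bfsEnq (v, q)).1) ∧
      (∀ x ∈ (ns.foldl bfsEnq (v, q)).1, x ∈ v ∨ x ∈ ns) ∧
      (∀ x, x ∈ (ns.foldl bfsEnq (v, q)).2 ↔
        x ∈ q ∨ (x ∈ (ns.foldl bfsEnq (v, q)).1 ∧ x ∉ v)) := by
  induction ns with
  | nil => intro v q; simp
  | cons n ns ih =>
    intro v q
    rw [List.foldl_cons]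
    by_cases hm : n ∈ v
    · have he : bfsEnq (v, q) n = (v, q) := by simp [bfsEnq, hm]
      rw [he]
      obtain ⟨P1, P2, P3, P4⟩ := ih v q
      refine ⟨P1, ?_, ?_, P4⟩
      · intro m hmm
        rcases List.mem_cons.mp hmm with rfl | h
        · exact P1 _ hm
        · exact P2 _ h
      · intro x hx
        rcases P3 x hx with h | h
        · exact Or.inl h
        · exact Or.inr (List.mem_cons_of_mem _ h)
    · have he : bfsEnq (v, q) n = (v ++ [n], q ++ [n]) := by
        simp [bfsEnq, hm, PySem.Set.add, PySem.Set.contains]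
      rw [he]
      obtain ⟨P1, P2, P3, P4⟩ := ih (v ++ [n]) (q ++ [n])
      refine ⟨?_, ?_, ?_, ?_⟩
      · intro x hx; exact P1 x (List.mem_append_left _ hx)
      · intro m hmm
        rcases List.mem_cons.mp hmm with rfl | h
        · exact P1 m (List.mem_append_right _ List.mem_cons_self)
        · exact P2 _ h
      · intro x hx
        rcases P3 x hx with h | h
        · rcases List.mem_append.mp h with h' | h'
          · exact Or.inl h'
          · have : x = n := by simpa using h'
            subst this; exact Or.inr List.mem_cons_self
        · exact Or.inr (List.mem_cons_of_mem _ h)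
      · intro x
        rw [P4 x]
        constructor
        · rintro (hq | ⟨h1, h2⟩)
          · rcases List.mem_append.mp hq with h' | h'
            · exact Or.inl h'
            · have hx : x = n := by simpa using h'
              subst hx
              exact Or.inr ⟨P1 x (List.mem_append_right _ List.mem_cons_self), hm⟩
          · refine Or.inr ⟨h1, fun hv => h2 (List.mem_append_left _ hv)⟩
        · rintro (hq | ⟨h1, h2⟩)
          · exact Or.inl (List.mem_append_left _ hq)
          · by_cases hx : x = n
            · subst hx; exact Or.inl (List.mem_append_right _ List.mem_cons_self)
            · refine Or.inr ⟨h1, fun hv => ?_⟩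
              rcases List.mem_append.mp hv with h' | h'
              · exact h2 h'
              · exact hx (by simpa using h')

theorem bfsLoop_iff (g : List (String × List String)) (s t : String) :
    ∀ v q, s ∈ v → (∀ x ∈ q, x ∈ v) → (∀ x ∈ v, pvReach g s x) → (t ∈ v → t ∈ q) →
      (∀ u ∈ v, u ∉ q → ∀ n, pvEdge g u n → n ∈ v) →
      (bfsLoop g t v q = true ↔ pvReach g s t) := by
  intro v q
  induction v, q using bfsLoop.induct g t with
  | case1 v =>
    intro h1 _ _ h4 h5
    rw [bfsLoop]
    simp only [Bool.false_eq_true, false_iff]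
    intro hre
    have hmem := pvClosedComplete g s v h1
      (fun u hu n he => h5 u hu (List.not_mem_nil) n he) t hre
    exact List.not_mem_nil (h4 hmem)
  | case2 v rest =>
    intro _ h2 h3 _ _
    rw [bfsLoop]
    simp only [true_iff, if_pos]
    exact h3 t (h2 t List.mem_cons_self)
  | case3 v c rest hne stv ih =>
    intro h1 h2 h3 h4 h5
    rw [bfsLoop]
    simp only [if_neg hne]
    obtain ⟨P1, P2, P3, P4⟩ := bfsEnq_props ((g.lookup c).getD []) v rest
    apply ih
    · exact P1 s h1
    · intro x hx
      rcases (P4 x).mp hx with h | ⟨h, -⟩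
      · exact P1 x (h2 x (List.mem_cons_of_mem _ h))
      · exact h
    · intro x hx
      rcases P3 x hx with h | h
      · exact h3 x h
      · exact (h3 c (h2 c List.mem_cons_self)).tail h
    · intro ht
      rw [P4]
      by_cases htv : t ∈ v
      · rcases List.mem_cons.mp (h4 htv) with rfl | h
        · exact absurd rfl hne
        · exact Or.inl h
      · exact Or.inr ⟨ht, htv⟩
    · intro u hu hnq n he
      by_cases huv : u ∈ v
      · by_cases huq : u ∈ (c :: rest)
        · rcases List.mem_cons.mp huq with rfl | h
          · exact P2 n he
          · exact absurd ((P4 u).mpr (Or.inl h)) hnq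
        · exact P1 n (h5 u huv huq n he)
      · exact absurd ((P4 u).mpr (Or.inr ⟨hu, huv⟩)) hnq

theorem bfs_py_iff (g : List (String × List String)) (s t : String) :
    bfs_py g s t = true ↔ pvReach g s t := by
  unfold bfs_py
  by_cases hst : s = t
  · subst hst
    simp only [true_iff, if_pos]
    exact Relation.ReflTransGen.refl
  · rw [if_neg hst]
    have hm : s ∈ PySem.Set.ofList [s] := by
      rw [PySem.Set.mem_ofList]; exact List.mem_cons_self
    refine bfsLoop_iff g s t (PySem.Set.ofList [s]) [s] hm ?_ ?_ ?_ ?_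
    · intro x hx
      rw [PySem.Set.mem_ofList]; exact hx
    · intro x hx
      rw [PySem.Set.mem_ofList] at hx
      simp only [List.mem_singleton] at hx
      subst hx; exact Relation.ReflTransGen.refl
    · intro ht
      rw [PySem.Set.mem_ofList] at ht
      simp only [List.mem_singleton] at ht
      exact absurd ht.symm hst
    · intro u hu hnq n he
      rw [PySem.Set.mem_ofList] at hu
      exact absurd hu hnq

-- ---------- B: the fixpoint loop computes the reachable set ----------

theorem passFold_reach (g : List (String × List String)) (s : String)
    (hk : (g.map Prod.fst).Nodup) :
    ∀ l : List (String × List String), (∀ p ∈ l, p ∈ g) →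
      ∀ st : PySem.Set String × Bool, (∀ x ∈ st.1, pvReach g s x) →
        ∀ x ∈ (l.foldl passPairs st).1, pvReach g s x := by
  intro l
  induction l with
  | nil => intro _ st h x hx; exact h x hx
  | cons p l ih =>
    intro hsub st hst
    rw [List.foldl_cons]
    by_cases hp : p.1 ∈ st.1
    · have he : passPairs st p = p.2.foldl passStep st := by simp [passPairs, hp]
      rw [he]
      refine ih (fun pp h => hsub pp (List.mem_cons_of_mem _ h)) _ ?_
      intro x hx
      obtain ⟨S1, S2, S3, S4, S5⟩ := passStepFold_props p.2 st
      rcases S3 x hx with h | h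
      · exact hst x h
      · have hlk : g.lookup p.1 = some p.2 :=
          pvMemLookup g p.1 p.2 hk (hsub p List.mem_cons_self)
        refine (hst p.1 hp).tail ?_
        rw [pvEdge, hlk]; exact h
    · have he : passPairs st p = st := by simp [passPairs, hp]
      rw [he]
      exact ih (fun pp h => hsub pp (List.mem_cons_of_mem _ h)) st hst

theorem fixLoop_spec (g : List (String × List String)) (s : String)
    (hk : (g.map Prod.fst).Nodup) :
    ∀ reach, s ∈ reach → (∀ x ∈ reach, pvReach g s x) →
      s ∈ fixLoop g reach ∧ (∀ x ∈ fixLoop g reach, pvReach g s x) ∧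
        (∀ p ∈ g, p.1 ∈ fixLoop g reach → ∀ n ∈ p.2, n ∈ fixLoop g reach) := by
  intro reach
  induction reach using fixLoop.induct g with
  | case1 r stv hch ihm =>
    intro hs hr
    have hch' : (pvPass g r).2 = true := hch
    obtain ⟨Q1, -, -⟩ := passFold_props g (r, false)
    have hunf : fixLoop g r = fixLoop g (pvPass g r).1 := by
      rw [fixLoop]
      show (if (pvPass g r).2 = true then fixLoop g (pvPass g r).1 else (pvPass g r).1)
        = fixLoop g (pvPass g r).1
      rw [if_pos hch']
    rw [hunf]
    exact ihm (Q1 s hs) (passFold_reach g s hk g (fun p h => h) (r, false) hr)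
  | case2 r stv hch =>
    intro hs hr
    have h2 : (pvPass g r).2 = false := by
      have : ¬ (pvPass g r).2 = true := hch
      simpa using this
    obtain ⟨-, -, Q3⟩ := passFold_props g (r, false)
    obtain ⟨-, heq, hclose⟩ := Q3 h2
    have hunf : fixLoop g r = (pvPass g r).1 := by
      rw [fixLoop]
      show (if (pvPass g r).2 = true then fixLoop g (pvPass g r).1 else (pvPass g r).1)
        = (pvPass g r).1
      rw [if_neg (by simp [h2])]
    rw [hunf]
    rw [show (pvPass g r).1 = r from heq]
    exact ⟨hs, hr, fun p hp hin n hn => hclose p hp hin n hn⟩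

theorem bfs_py_alt_iff (g : List (String × List String)) (s t : String)
    (hk : (g.map Prod.fst).Nodup) :
    bfs_py_alt g s t = true ↔ pvReach g s t := by
  unfold bfs_py_alt
  rw [PySem.Set.contains_iff]
  have hm : s ∈ PySem.Set.ofList [s] := by
    rw [PySem.Set.mem_ofList]; exact List.mem_cons_self
  have hr : ∀ x ∈ PySem.Set.ofList [s], pvReach g s x := by
    intro x hx
    rw [PySem.Set.mem_ofList] at hx
    simp only [List.mem_singleton] at hx
    subst hx; exact Relation.ReflTransGen.refl
  obtain ⟨F1, F2, F3⟩ := fixLoop_spec g s hk (PySem.Set.ofList [s]) hm hr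
  constructor
  · exact F2 t
  · intro hre
    refine pvClosedComplete g s _ F1 ?_ t hre
    intro u hu n he
    rw [pvEdge] at he
    cases hl : g.lookup u with
    | none => rw [hl] at he; exact absurd he List.not_mem_nil
    | some ns =>
      rw [hl] at he
      exact F3 (u, ns) (pvLookupMem g u ns hl) hu n he

-- ===== VERDICT (by name: the statement is the Claim_ definition above) =====
theorem bfs_py_spec : Claim_equal_bfs_py := by
  intro g s t _ hpre
  unfold Spec_bfs_py
  exact Bool.coe_iff_coe.mp (by rw [bfs_py_iff g s t, bfs_py_alt_iff g s t hpre])
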